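-- pv_equiv track=rewrite | github.com/fiyo/DBCheck | fix_index2.py | replace_lines
-- ===== SOURCE A (Python) =====
-- def replace_lines(lines, start_pat, end_pat, new_lines):
--     """找到 start_pat 所在行，一直替换到 end_pat 所在行（不含 end_pat 行）"""
--     si = None
--     ei = None
--     for i, ln in enumerate(lines):
--         if start_pat in ln and si is None:
--             si = i
--         if si is not None and end_pat in ln:
--             ei = i
--             break
--     if si is not None and ei is not None:
--         return lines[:si] + new_lines + lines[ei:]
--     return lines
-- ===== SOURCE B (Python) =====
-- def replace_lines(lines, start_pat, end_pat, new_lines):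
--     """找到 start_pat 所在行，一直替换到 end_pat 所在行（不含 end_pat 行）"""
--     kept = []      # lines before the start-pattern line
--     suffix = []    # the end-pattern line and everything after it
--     mode = 0       # 0: looking for start, 1: looking for end, 2: copying the suffix
--     for ln in lines:
--         if mode == 0 and start_pat in ln:
--             mode = 1
--         if mode == 1 and end_pat in ln:
--             mode = 2
--         if mode == 0:
--             kept.append(ln)
--         if mode == 2:
--             suffix.append(ln)
--     return kept + new_lines + suffix if mode == 2 else lines
-- ===== Notes on version B (the rewrite author's own statement) =====
-- stated objective: alternative
-- what changed: Replaces A's index-recording loop plus slice splicing with a single-pass three-state machine that builds the kept prefix and the suffix lists directly while streaming over the lines; no enumerate, indices, break or slicing.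
import Mathlib
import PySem

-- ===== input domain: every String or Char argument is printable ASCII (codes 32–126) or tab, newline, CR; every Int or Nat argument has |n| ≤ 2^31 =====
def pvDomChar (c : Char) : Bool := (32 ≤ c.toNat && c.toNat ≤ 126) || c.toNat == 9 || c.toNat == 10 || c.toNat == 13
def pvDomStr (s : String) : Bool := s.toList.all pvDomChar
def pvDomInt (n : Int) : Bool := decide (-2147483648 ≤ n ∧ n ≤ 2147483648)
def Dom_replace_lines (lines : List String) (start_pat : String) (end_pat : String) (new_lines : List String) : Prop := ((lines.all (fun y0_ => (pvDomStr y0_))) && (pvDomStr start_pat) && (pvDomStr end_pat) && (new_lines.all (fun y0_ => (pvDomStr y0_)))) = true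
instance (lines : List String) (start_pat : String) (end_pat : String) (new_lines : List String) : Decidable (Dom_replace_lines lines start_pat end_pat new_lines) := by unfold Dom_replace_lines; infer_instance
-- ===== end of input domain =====

-- B replaces A's index-recording loop + slice splicing by a single-pass three-state machine
-- that builds the kept prefix and the suffix directly; same values, no speed claim.

-- ===== PORT A =====
-- A's loop: carries (si, ei); sets si at the first line containing start_pat, and from that
-- iteration on (same line included) breaks at the first line containing end_pat.
def replaceLinesLoopA (start_pat end_pat : String) : List String → Int → Option Int → Option Int × Option Int
  | [], _, si => (si, none)
  | ln :: rest, i, si =>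
    let si' := if PySem.Str.isIn start_pat ln && (si == none) then some i else si
    if (si' != none) && PySem.Str.isIn end_pat ln then (si', some i)
    else replaceLinesLoopA start_pat end_pat rest (i + 1) si'

def replace_lines (lines : List String) (start_pat : String) (end_pat : String) (new_lines : List String) : List String :=
  match replaceLinesLoopA start_pat end_pat lines 0 none with
  | (some si, some ei) =>
      PySem.List.slice lines none (some si) ++ new_lines ++ PySem.List.slice lines (some ei) none
  | _ => lines

-- ===== PORT B =====
-- one step of B's state machine over (kept, mode, suffix)
def stepB (start_pat end_pat : String) (st : List String × Nat × List String) (ln : String) :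
    List String × Nat × List String :=
  let (kept, mode, suffix) := st
  let mode := if mode == 0 && PySem.Str.isIn start_pat ln then 1 else mode
  let mode := if mode == 1 && PySem.Str.isIn end_pat ln then 2 else mode
  (if mode == 0 then kept ++ [ln] else kept, mode, if mode == 2 then suffix ++ [ln] else suffix)

def replace_lines_alt (lines : List String) (start_pat : String) (end_pat : String) (new_lines : List String) : List String :=
  match lines.foldl (stepB start_pat end_pat) ([], 0, []) with
  | (kept, mode, suffix) => if mode == 2 then kept ++ new_lines ++ suffix else lines

-- ===== PRECONDITION & SPEC =====
def Spec_replace_lines (lines : List String) (start_pat : String) (end_pat : String) (new_lines : List String) (out : List String) : Prop := out = replace_lines_alt lines start_pat end_pat new_lines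
instance (lines : List String) (start_pat : String) (end_pat : String) (new_lines : List String) (out : List String) : Decidable (Spec_replace_lines lines start_pat end_pat new_lines out) := by unfold Spec_replace_lines; infer_instance

-- ===== CLAIM =====
def Claim_equal_replace_lines : Prop := ∀ (lines : List String) (start_pat : String) (end_pat : String) (new_lines : List String), Dom_replace_lines lines start_pat end_pat new_lines → Spec_replace_lines lines start_pat end_pat new_lines (replace_lines lines start_pat end_pat new_lines)

-- ===== LEMMAS AND PROOFS =====

-- proof-side helper: first index j ≥ i (enumerating from i) whose line contains pat
def findIdxFrom (pat : String) : List String → Int → Option Int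
  | [], _ => none
  | ln :: rest, i => if PySem.Str.isIn pat ln then some i else findIdxFrom pat rest (i + 1)

lemma findIdxFrom_ge (pat : String) (xs : List String) (i s : Int)
    (h : findIdxFrom pat xs i = some s) : i ≤ s := by
  induction xs generalizing i with
  | nil => simp [findIdxFrom] at h
  | cons ln rest ih =>
    simp only [findIdxFrom] at h
    split at h
    · injection h with h; omega
    · have := ih (i + 1) h; omega

-- once si is set, A's loop only searches for end_pat, like findIdxFrom
lemma loopA_some (sp ep : String) (xs : List String) (i s : Int) :
    replaceLinesLoopA sp ep xs i (some s) = (some s, findIdxFrom ep xs i) := by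
  induction xs generalizing i with
  | nil => rfl
  | cons ln rest ih =>
    by_cases he : PySem.Chars.isIn ep.toList ln.toList <;>
      simp [replaceLinesLoopA, findIdxFrom, he, ih]

-- A's loop from state none: find start, then find end in the suffix from that index
lemma loopA_none (sp ep : String) (xs : List String) (i : Int) :
    replaceLinesLoopA sp ep xs i none =
      match findIdxFrom sp xs i with
      | none => (none, none)
      | some s => (some s, findIdxFrom ep (xs.drop (s - i).toNat) s) := by
  induction xs generalizing i with
  | nil => rfl
  | cons ln rest ih =>
    by_cases hs : PySem.Chars.isIn sp.toList ln.toList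
    · by_cases he : PySem.Chars.isIn ep.toList ln.toList
      · simp [replaceLinesLoopA, findIdxFrom, hs, he]
      · simp [replaceLinesLoopA, findIdxFrom, hs, he, loopA_some]
    · have h1 : replaceLinesLoopA sp ep (ln :: rest) i none =
          replaceLinesLoopA sp ep rest (i + 1) none := by
        simp [replaceLinesLoopA, hs]
      have h2 : findIdxFrom sp (ln :: rest) i = findIdxFrom sp rest (i + 1) := by
        simp [findIdxFrom, hs]
      rw [h1, ih (i + 1), h2]
      cases hf : findIdxFrom sp rest (i + 1) with
      | none => rfl
      | some s =>
        have hle := findIdxFrom_ge sp rest (i + 1) s hf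
        have hdrop : (ln :: rest).drop (s - i).toNat = rest.drop (s - (i + 1)).toNat := by
          have h3 : (s - i).toNat = (s - (i + 1)).toNat + 1 := by omega
          simp [h3]
        simp [hdrop]

-- B's fold from mode 2: copies everything into the suffix
lemma foldB_two (sp ep : String) (xs kept suffix : List String) :
    xs.foldl (stepB sp ep) (kept, 2, suffix) = (kept, 2, suffix ++ xs) := by
  induction xs generalizing suffix with
  | nil => simp
  | cons ln rest ih => simp [stepB, ih]

-- B's fold from mode 1: searches for end_pat, then copies the suffix
lemma foldB_one (sp ep : String) (xs kept suffix : List String) (i : Int) :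
    xs.foldl (stepB sp ep) (kept, 1, suffix) =
      match findIdxFrom ep xs i with
      | none => (kept, 1, suffix)
      | some e => (kept, 2, suffix ++ xs.drop (e - i).toNat) := by
  induction xs generalizing suffix i with
  | nil => rfl
  | cons ln rest ih =>
    by_cases he : PySem.Chars.isIn ep.toList ln.toList
    · simp [stepB, findIdxFrom, he, foldB_two]
    · have h1 : List.foldl (stepB sp ep) (kept, 1, suffix) (ln :: rest) =
          List.foldl (stepB sp ep) (kept, 1, suffix) rest := by
        simp [stepB, he]
      rw [h1, ih suffix (i + 1)]
      have h2 : findIdxFrom ep (ln :: rest) i = findIdxFrom ep rest (i + 1) := by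
        simp [findIdxFrom, he]
      rw [h2]
      cases hf : findIdxFrom ep rest (i + 1) with
      | none => rfl
      | some e =>
        have hle := findIdxFrom_ge ep rest (i + 1) e hf
        have h3 : (e - i).toNat = (e - (i + 1)).toNat + 1 := by omega
        simp [h3]

-- B's fold from mode 0: searches for start_pat, then behaves like mode 1
lemma foldB_zero (sp ep : String) (xs kept : List String) (i : Int) :
    xs.foldl (stepB sp ep) (kept, 0, []) =
      match findIdxFrom sp xs i with
      | none => (kept ++ xs, 0, [])
      | some s =>
        match findIdxFrom ep (xs.drop (s - i).toNat) s with
        | none => (kept ++ xs.take (s - i).toNat, 1, [])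
        | some e => (kept ++ xs.take (s - i).toNat, 2, (xs.drop (s - i).toNat).drop (e - s).toNat) := by
  induction xs generalizing kept i with
  | nil => simp [findIdxFrom]
  | cons ln rest ih =>
    by_cases hs : PySem.Chars.isIn sp.toList ln.toList
    · by_cases he : PySem.Chars.isIn ep.toList ln.toList
      · simp [stepB, findIdxFrom, hs, he, foldB_two]
      · have h1 : List.foldl (stepB sp ep) (kept, 0, []) (ln :: rest) =
            List.foldl (stepB sp ep) (kept, 1, []) rest := by
          simp [stepB, hs, he]
        rw [h1, foldB_one sp ep rest kept [] (i + 1)]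
        have h2 : findIdxFrom sp (ln :: rest) i = some i := by simp [findIdxFrom, hs]
        have h4 : findIdxFrom ep (ln :: rest) i = findIdxFrom ep rest (i + 1) := by
          simp [findIdxFrom, he]
        rw [h2]
        simp only [Int.sub_self, Int.toNat_zero, List.drop_zero, List.take_zero, h4]
        cases hf : findIdxFrom ep rest (i + 1) with
        | none => simp
        | some e =>
          have hle := findIdxFrom_ge ep rest (i + 1) e hf
          have h3 : (e - i).toNat = (e - (i + 1)).toNat + 1 := by omega
          simp [h3]
    · have h1 : List.foldl (stepB sp ep) (kept, 0, []) (ln :: rest) =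
          List.foldl (stepB sp ep) (kept ++ [ln], 0, []) rest := by
        simp [stepB, hs]
      rw [h1, ih (kept ++ [ln]) (i + 1)]
      have h2 : findIdxFrom sp (ln :: rest) i = findIdxFrom sp rest (i + 1) := by
        simp [findIdxFrom, hs]
      rw [h2]
      cases hf : findIdxFrom sp rest (i + 1) with
      | none => simp
      | some s =>
        have hle := findIdxFrom_ge sp rest (i + 1) s hf
        have h3 : (s - i).toNat = (s - (i + 1)).toNat + 1 := by omega
        simp only [h3, List.drop_succ_cons, List.take_succ_cons]
        cases findIdxFrom ep (rest.drop (s - (i + 1)).toNat) s <;> simp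

-- ===== VERDICT =====
theorem replace_lines_spec : Claim_equal_replace_lines := by
  intro lines sp ep nl _
  unfold Spec_replace_lines replace_lines replace_lines_alt
  rw [loopA_none, foldB_zero sp ep lines [] 0]
  cases hf : findIdxFrom sp lines 0 with
  | none => rfl
  | some s =>
    have h0 : (0 : Int) ≤ s := findIdxFrom_ge sp lines 0 s hf
    simp only [Int.sub_zero]
    cases hg : findIdxFrom ep (lines.drop s.toNat) s with
    | none => rfl
    | some e =>
      have he0 : s ≤ e := findIdxFrom_ge ep _ s e hg
      simp only
      rw [PySem.List.slice_to lines h0, PySem.List.slice_from lines (by omega : (0:Int) ≤ e)]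
      have hdd : (lines.drop s.toNat).drop (e - s).toNat = lines.drop e.toNat := by
        rw [List.drop_drop]
        congr 1
        omega
      simp [hdd]
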